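-- pv_equiv track=rewrite | github.com/BrianMills2718/kgas | src/nlp/question_complexity_analyzer.py | _identify_parallelizable_components
-- ===== SOURCE A (Python) =====
-- from typing import List, Dict, Optional
--
-- def _identify_parallelizable_components(question: str, complexity_factors: Dict[str, float]) -> int:
--     """Identify components that can be executed in parallel"""
--     parallelizable = 0
--
--     # Multiple independent analyses mentioned
--     if ' and ' in question:
--         # Count independent clauses
--         clauses = question.split(' and ')
--
--         # Check if clauses are independent (don't reference each other)
--         independent_clauses = 0
--         for i, clause in enumerate(clauses):
--             is_independent = True
--             for j, other_clause in enumerate(clauses):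
--                 if i != j and any(word in clause.lower() for word in ['their', 'these', 'those', 'it']):
--                     is_independent = False
--                     break
--             if is_independent:
--                 independent_clauses += 1
--
--         if independent_clauses > 1:
--             parallelizable = independent_clauses - 1
--
--     # Different types of analysis that can run in parallel
--     parallel_analyses = []
--     if 'sentiment' in question.lower():
--         parallel_analyses.append('sentiment')
--     if 'theme' in question.lower() or 'topic' in question.lower():
--         parallel_analyses.append('theme')
--     if 'pattern' in question.lower():
--         parallel_analyses.append('pattern')
--     if 'statistic' in question.lower():
--         parallel_analyses.append('statistics')
--
--     if len(parallel_analyses) > 1: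
--         parallelizable = max(parallelizable, len(parallel_analyses) - 1)
--
--     return parallelizable
-- ===== SOURCE B (Python) =====
-- def _identify_parallelizable_components(question: str, complexity_factors) -> int:
--     """Identify components that can be executed in parallel.
--
--     The original's inner loop over all other clauses only tests a predicate of
--     the outer clause, so a clause is independent iff it contains no reference
--     word (given >= 2 clauses, which ' and ' guarantees); count those directly.
--     """
--     markers = ('their', 'these', 'those', 'it')
--     parallelizable = 0
--     if ' and ' in question:
--         independent = sum(
--             1 for c in question.split(' and ')
--             if not any(m in c.lower() for m in markers)
--         )
--         parallelizable = max(0, independent - 1)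
--     ql = question.lower()
--     n_analyses = (('sentiment' in ql)
--                   + ('theme' in ql or 'topic' in ql)
--                   + ('pattern' in ql)
--                   + ('statistic' in ql))
--     if n_analyses > 1:
--         parallelizable = max(parallelizable, n_analyses - 1)
--     return parallelizable
-- ===== Notes on version B (the rewrite author's own statement) =====
-- stated objective: simpler
-- what changed: A's inner loop over all other clauses tests a predicate that only reads the outer clause, so B drops the nested scan and the intermediate analysis list: it counts independent clauses with a single countP-style pass and sums the analysis-kind flags directly.
import Mathlib
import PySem

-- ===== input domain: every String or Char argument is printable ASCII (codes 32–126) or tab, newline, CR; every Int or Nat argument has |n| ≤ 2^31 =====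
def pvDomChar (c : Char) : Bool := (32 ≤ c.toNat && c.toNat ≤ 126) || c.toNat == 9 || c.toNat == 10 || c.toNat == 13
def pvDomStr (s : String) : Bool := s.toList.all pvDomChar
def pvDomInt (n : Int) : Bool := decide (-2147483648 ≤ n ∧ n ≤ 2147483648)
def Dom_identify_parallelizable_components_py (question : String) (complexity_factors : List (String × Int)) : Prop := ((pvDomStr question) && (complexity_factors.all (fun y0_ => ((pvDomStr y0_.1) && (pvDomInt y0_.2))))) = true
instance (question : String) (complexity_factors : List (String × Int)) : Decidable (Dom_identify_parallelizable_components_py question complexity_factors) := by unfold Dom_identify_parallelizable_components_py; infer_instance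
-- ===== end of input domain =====

-- B drops A's redundant inner loop over the other clauses (its test only reads the outer
-- clause) and counts independent clauses and analysis kinds directly, without the
-- intermediate analysis list.

-- ===== PORT A =====
-- the reference words tested by the inner 'any'
def pyRefWords : List String := ["their", "these", "those", "it"]

-- inner loop: 'for j, other_clause in enumerate(clauses): if i != j and any(...): is_independent = False; break'
def pyInnerLoop (i : Int) (clause : String) (pairs : List (Int × String)) : Bool :=
  match pairs with
  | [] => true
  | (j, _) :: rest =>
      if i ≠ j ∧ (pyRefWords.any (fun w => PySem.Str.isIn w (PySem.Str.lower clause))) then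
        false
      else
        pyInnerLoop i clause rest

-- outer loop: 'for i, clause in enumerate(clauses): ... if is_independent: independent_clauses += 1'
def pyOuterLoop (clauses : List String) (pairs : List (Int × String)) (acc : Int) : Int :=
  match pairs with
  | [] => acc
  | (i, clause) :: rest =>
      pyOuterLoop clauses rest
        (if pyInnerLoop i clause (PySem.List.enumerate clauses) then acc + 1 else acc)

def identify_parallelizable_components_py (question : String) (complexity_factors : List (String × Int)) : Int :=
  let parallelizable : Int := 0
  let parallelizable : Int :=
    if PySem.Str.isIn " and " question then
      -- question.split(' and '); the separator is a nonempty literal so split? is never none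
      let clauses : List String := (PySem.Str.split? question " and ").getD []
      let independent_clauses : Int := pyOuterLoop clauses (PySem.List.enumerate clauses) 0
      if independent_clauses > 1 then independent_clauses - 1 else parallelizable
    else parallelizable
  let parallel_analyses : List String := []
  let parallel_analyses : List String :=
    if PySem.Str.isIn "sentiment" (PySem.Str.lower question) then parallel_analyses ++ ["sentiment"] else parallel_analyses
  let parallel_analyses : List String :=
    if PySem.Str.isIn "theme" (PySem.Str.lower question) ∨ PySem.Str.isIn "topic" (PySem.Str.lower question) then parallel_analyses ++ ["theme"] else parallel_analyses
  let parallel_analyses : List String :=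
    if PySem.Str.isIn "pattern" (PySem.Str.lower question) then parallel_analyses ++ ["pattern"] else parallel_analyses
  let parallel_analyses : List String :=
    if PySem.Str.isIn "statistic" (PySem.Str.lower question) then parallel_analyses ++ ["statistics"] else parallel_analyses
  if (parallel_analyses.length : Int) > 1 then
    max parallelizable ((parallel_analyses.length : Int) - 1)
  else parallelizable

-- ===== PORT B =====
def altMarkers : List String := ["their", "these", "those", "it"]

-- a clause contains a reference word
def altHasMarker (c : String) : Bool :=
  altMarkers.any (fun m => PySem.Str.isIn m (PySem.Str.lower c))

def identify_parallelizable_components_py_alt (question : String) (complexity_factors : List (String × Int)) : Int :=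
  let parallelizable : Int :=
    if PySem.Str.isIn " and " question then
      let independent : Int :=
        (((PySem.Str.split? question " and ").getD []).countP (fun c => !altHasMarker c) : Int)
      max 0 (independent - 1)
    else 0
  let ql := PySem.Str.lower question
  let n_analyses : Int :=
    (if PySem.Str.isIn "sentiment" ql then 1 else 0)
    + (if PySem.Str.isIn "theme" ql ∨ PySem.Str.isIn "topic" ql then 1 else 0)
    + (if PySem.Str.isIn "pattern" ql then 1 else 0)
    + (if PySem.Str.isIn "statistic" ql then 1 else 0)
  if n_analyses > 1 then max parallelizable (n_analyses - 1) else parallelizable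

-- ===== PRECONDITION & SPEC =====
def Spec_identify_parallelizable_components_py (question : String) (complexity_factors : List (String × Int)) (out : Int) : Prop := out = identify_parallelizable_components_py_alt question complexity_factors
instance (question : String) (complexity_factors : List (String × Int)) (out : Int) : Decidable (Spec_identify_parallelizable_components_py question complexity_factors out) := by unfold Spec_identify_parallelizable_components_py; infer_instance

-- ===== CLAIM (what is proved, stated in full; the proofs are below) =====
def Claim_equal_identify_parallelizable_components_py : Prop := ∀ (question : String) (complexity_factors : List (String × Int)), Dom_identify_parallelizable_components_py question complexity_factors → Spec_identify_parallelizable_components_py question complexity_factors (identify_parallelizable_components_py question complexity_factors)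

-- ===== LEMMAS AND PROOFS =====

-- the inner loop's test does not read the inner clause: it is false iff the outer clause
-- has a reference word and some enumerated index differs from i
theorem pyInnerLoop_eq (i : Int) (clause : String) (pairs : List (Int × String)) :
    pyInnerLoop i clause pairs
      = !(altHasMarker clause && pairs.any (fun p => p.1 ≠ i)) := by
  induction pairs with
  | nil => simp [pyInnerLoop]
  | cons p rest ih =>
      obtain ⟨j, o⟩ := p
      have hmk : pyRefWords.any (fun w => PySem.Str.isIn w (PySem.Str.lower clause))
          = altHasMarker clause := rfl
      rw [show pyInnerLoop i clause ((j, o) :: rest)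
            = (if i ≠ j ∧ pyRefWords.any (fun w => PySem.Str.isIn w (PySem.Str.lower clause)) then
                false else pyInnerLoop i clause rest) from rfl, hmk, ih]
      by_cases hm : altHasMarker clause = true
      · by_cases hj : i = j <;> simp [hm, hj, List.any_cons, eq_comm]
      · simp only [Bool.not_eq_true] at hm
        simp [hm]

-- the outer loop is a 0/1 count over the enumerated pairs
theorem pyOuterLoop_eq (clauses : List String) (pairs : List (Int × String)) (acc : Int) :
    pyOuterLoop clauses pairs acc
      = acc + (pairs.countP (fun p => pyInnerLoop p.1 p.2 (PySem.List.enumerate clauses)) : Int) := by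
  induction pairs generalizing acc with
  | nil => simp [pyOuterLoop]
  | cons p rest ih =>
      obtain ⟨i, c⟩ := p
      by_cases h : pyInnerLoop i c (PySem.List.enumerate clauses) = true <;>
        simp [pyOuterLoop, ih, h] <;> ring

-- with at least two clauses, every enumerated index sees another index
theorem enumerate_any_ne (a b : String) (rest : List String) (i : Int) :
    (PySem.List.enumerate (a :: b :: rest) 0).any (fun p => p.1 ≠ i) = true := by
  simp [PySem.List.enumerate_cons]
  by_cases h0 : (0 : Int) = i
  · right; left; omega
  · left; omega

-- hence A's independent-clause count equals B's direct count whenever there are ≥ 2 clauses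
theorem count_eq_of_two (a b : String) (rest : List String) :
    pyOuterLoop (a :: b :: rest) (PySem.List.enumerate (a :: b :: rest)) 0
      = ((a :: b :: rest).countP (fun c => !altHasMarker c) : Int) := by
  rw [pyOuterLoop_eq]
  have hcnt : (PySem.List.enumerate (a :: b :: rest)).countP
      (fun p => pyInnerLoop p.1 p.2 (PySem.List.enumerate (a :: b :: rest)))
      = (a :: b :: rest).countP (fun c => !altHasMarker c) := by
    have h1 : (PySem.List.enumerate (a :: b :: rest)).countP
        (fun p => pyInnerLoop p.1 p.2 (PySem.List.enumerate (a :: b :: rest)))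
        = (PySem.List.enumerate (a :: b :: rest)).countP (fun p => !altHasMarker p.2) := by
      apply List.countP_congr
      intro p _
      rw [pyInnerLoop_eq, enumerate_any_ne a b rest p.1]
      simp
    rw [h1]
    have h2 := PySem.List.map_snd_enumerate (a :: b :: rest) 0
    calc (PySem.List.enumerate (a :: b :: rest)).countP (fun p => !altHasMarker p.2)
        = ((PySem.List.enumerate (a :: b :: rest)).map (fun p => p.2)).countP (fun c => !altHasMarker c) := by
          rw [List.countP_map]; rfl
      _ = (a :: b :: rest).countP (fun c => !altHasMarker c) := by rw [h2]
  rw [hcnt]; ring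

-- A's 'if count > 1 then count - 1 else 0' for the clause part equals B's 'max 0 (count - 1)'
theorem clause_part_eq (clauses : List String) :
    (if pyOuterLoop clauses (PySem.List.enumerate clauses) 0 > 1 then
        pyOuterLoop clauses (PySem.List.enumerate clauses) 0 - 1 else (0 : Int))
      = max 0 ((clauses.countP (fun c => !altHasMarker c) : Int) - 1) := by
  match clauses with
  | [] => simp [pyOuterLoop]
  | [c] =>
      -- a single clause: A counts it independent (no other index), B may not; both sides are 0
      have h : pyOuterLoop [c] (PySem.List.enumerate [c]) 0 = 1 := by
        simp [PySem.List.enumerate_cons, PySem.List.enumerate_nil, pyOuterLoop, pyInnerLoop]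
      rw [h]
      have : ((([c] : List String).countP (fun c => !altHasMarker c) : Int)) ≤ 1 := by
        have := List.countP_le_length (l := [c]) (p := fun c => !altHasMarker c)
        simp at this ⊢
        omega
      omega
  | a :: b :: rest =>
      rw [count_eq_of_two a b rest]
      have : (0 : Int) ≤ ((a :: b :: rest).countP (fun c => !altHasMarker c) : Int) := by positivity
      omega

-- ===== VERDICT (by name: the statement is the Claim_ definition above) =====
theorem identify_parallelizable_components_py_spec : Claim_equal_identify_parallelizable_components_py := by
  intro question complexity_factors _
  unfold Spec_identify_parallelizable_components_py
  unfold identify_parallelizable_components_py identify_parallelizable_components_py_alt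
  simp only
  have hcl := clause_part_eq ((PySem.Str.split? question " and ").getD [])
  by_cases h1 : PySem.Str.isIn " and " question = true <;>
  by_cases h2 : PySem.Str.isIn "sentiment" (PySem.Str.lower question) = true <;>
  by_cases h3 : (PySem.Str.isIn "theme" (PySem.Str.lower question) = true ∨
      PySem.Str.isIn "topic" (PySem.Str.lower question) = true) <;>
  by_cases h4 : PySem.Str.isIn "pattern" (PySem.Str.lower question) = true <;>
  by_cases h5 : PySem.Str.isIn "statistic" (PySem.Str.lower question) = true <;>
  simp only [h1, h2, h3, h4, h5, ite_true, ite_false,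
    List.nil_append, List.length_append, List.length_cons, List.length_nil] <;>
  first
    | (rw [hcl]; norm_num)
    | norm_num
    | rfl
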